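-- pv_equiv track=rewrite | github.com/MZI207/AI-Algorithms | CSP/Futoshiki.py | colDif
-- ===== SOURCE A (Python) =====
-- def colDif(col, world):
--     colVals = []
--     for row in range(5):
--         if world[row][col] in colVals:
--             return False
--         if world[row][col] != 0:
--             colVals.append(world[row][col])
--     return True
-- ===== SOURCE B (Python) =====
-- def colDif(col, world):
--     return not any(world[row][col] != 0 and world[row][col] == world[prev][col]
--                    for row in range(5) for prev in range(row))
-- ===== Notes on version B (the rewrite author's own statement) =====
-- stated objective: alternative
-- what changed: Replaces A's early-returning loop with an incrementally maintained membership list by a single flat pairwise test: not any(world[row][col] != 0 and world[row][col] == world[prev][col]) over all ordered row pairs, keeping no state at all.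
import Mathlib
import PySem

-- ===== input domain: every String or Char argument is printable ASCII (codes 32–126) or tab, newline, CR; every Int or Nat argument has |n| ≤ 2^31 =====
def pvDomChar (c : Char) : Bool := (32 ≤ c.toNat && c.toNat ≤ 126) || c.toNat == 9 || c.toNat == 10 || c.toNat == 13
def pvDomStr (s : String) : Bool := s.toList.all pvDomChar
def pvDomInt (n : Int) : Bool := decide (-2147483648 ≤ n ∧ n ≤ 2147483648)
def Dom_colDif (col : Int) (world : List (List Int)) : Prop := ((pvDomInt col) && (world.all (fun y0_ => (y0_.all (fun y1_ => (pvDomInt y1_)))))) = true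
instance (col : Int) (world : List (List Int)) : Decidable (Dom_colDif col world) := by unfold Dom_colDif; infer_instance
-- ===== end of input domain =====

-- B replaces A's early-returning scan with an incrementally maintained membership list (colVals)
-- by a stateless flat pairwise test: not any(world[row][col] != 0 and world[row][col] ==
-- world[prev][col] for row in range(5) for prev in range(row)).

-- ===== PORT A =====
-- world[row][col] (a row lookup followed by a column lookup); none = IndexError
def pvCell (col : Int) (world : List (List Int)) (row : Int) : Option Int :=
  (PySem.List.pyGet? world row).bind (fun rw => PySem.List.pyGet? rw col)

-- A's 'for row in range(5)' loop with early returns, state = colVals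
def colDifGo (col : Int) (world : List (List Int)) : List Int → List Int → Bool
  | [], _ => true
  | r :: rs, colVals =>
    match pvCell col world r with
    | none => false   -- IndexError (outside Pre_colDif)
    | some v =>
      if v ∈ colVals then false
      else colDifGo col world rs (if v ≠ 0 then colVals ++ [v] else colVals)

def colDif (col : Int) (world : List (List Int)) : Bool :=
  colDifGo col world (PySem.List.pyRange 0 5 1) []

-- ===== PORT B =====
-- the (row, prev) pairs the double generator 'for row in range(5) for prev in range(row)' yields
def pvPairs : List (Int × Int) :=
  (PySem.List.pyRange 0 5 1).flatMap
    (fun row => (PySem.List.pyRange 0 row 1).map (fun prev => (row, prev)))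

-- the short-circuiting 'any' over that generator; pvCell = world[·][col].
-- On an unreadable cell Python's generator raises IndexError (outside Pre_colDif): Python
-- evaluates world[row][col] before world[prev][col], while this match reads both — the
-- difference is only visible on raising inputs, which Pre_colDif excludes.
def colDifAnyGo (col : Int) (world : List (List Int)) : List (Int × Int) → Bool
  | [] => false
  | (row, prev) :: ps =>
    match pvCell col world row, pvCell col world prev with
    | some v, some w => if v ≠ 0 ∧ v = w then true else colDifAnyGo col world ps
    | _, _ => true   -- IndexError (outside Pre_colDif)

def colDif_alt (col : Int) (world : List (List Int)) : Bool :=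
  !(colDifAnyGo col world pvPairs)

-- ===== PRECONDITION & SPEC =====
-- Pre_ is exactly the inputs on which Python A (and equally Python B) returns normally:
-- each cell world[r][col], r = 0..4, is indexable, unless an earlier nonzero duplicate in the
-- column makes both functions return False before row r is ever read (otherwise both raise
-- IndexError).
def Pre_colDif (col : Int) (world : List (List Int)) : Prop :=
  ∀ r ∈ PySem.List.pyRange 0 5 1,
    (pvCell col world r).isSome = true ∨
    ∃ i ∈ PySem.List.pyRange 0 r 1, ∃ j ∈ PySem.List.pyRange 0 i 1,
      (pvCell col world i).isSome = true ∧
      pvCell col world i = pvCell col world j ∧ pvCell col world i ≠ some 0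
instance (col : Int) (world : List (List Int)) : Decidable (Pre_colDif col world) := by
  unfold Pre_colDif; infer_instance

def pvWitness_colDif : Int × List (List Int) :=
  (2, [[0,1,2],[3,0,4],[0,5,0],[6,7,3],[0,0,0]])

def Spec_colDif (col : Int) (world : List (List Int)) (out : Bool) : Prop := out = colDif_alt col world
instance (col : Int) (world : List (List Int)) (out : Bool) : Decidable (Spec_colDif col world out) := by unfold Spec_colDif; infer_instance

-- ===== CLAIM (what is proved, stated in full; the proofs are below) =====
def Claim_equal_colDif : Prop := ∀ (col : Int) (world : List (List Int)), Dom_colDif col world → Pre_colDif col world → Spec_colDif col world (colDif col world)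

-- ===== LEMMAS AND PROOFS =====

-- B's scan of the row-n pair block (n, p) for p ∈ plist, when cell n reads some v and every
-- earlier cell in plist is readable, is an 'any' over plist followed by the rest
theorem rowScan (col : Int) (world : List (List Int)) (n v : Int)
    (hc : pvCell col world n = some v) :
    ∀ (plist : List Int) (rest : List (Int × Int)),
      (∀ p ∈ plist, (pvCell col world p).isSome = true) →
      colDifAnyGo col world ((plist.map (fun prev => (n, prev))) ++ rest) =
        (plist.any (fun p => decide (v ≠ 0) && (pvCell col world p == some v)) ||
          colDifAnyGo col world rest) := by
  intro plist
  induction plist with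
  | nil => intro rest _; simp
  | cons p ps ih =>
    intro rest hread
    obtain ⟨w, hw⟩ := Option.isSome_iff_exists.1 (hread p (List.mem_cons_self ..))
    simp only [List.map_cons, List.cons_append, colDifAnyGo, hc, hw, List.any_cons]
    by_cases hcond : v ≠ 0 ∧ v = w
    · rw [if_pos hcond]
      simp [hcond.1, hcond.2.symm]
    · rw [if_neg hcond]
      have : (decide (v ≠ 0) && (some w == some v)) = false := by
        by_cases hv : v = 0
        · simp [hv]
        · have hwv : w ≠ v := fun h => hcond ⟨hv, h.symm⟩
          simp [hwv]
      rw [this, Bool.false_or]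
      exact ih rest (fun q hq => hread q (List.mem_cons_of_mem _ hq))

-- Lockstep: A's loop from row n with its colVals accumulator equals the negated 'any' over the
-- remaining pair blocks, under the invariants that rows 0..n-1 are readable, carry no nonzero
-- duplicate, and colVals is exactly their nonzero values
theorem go_agree (col : Int) (world : List (List Int)) (hpre : Pre_colDif col world) :
    ∀ (m n : Nat), (n : Int) + (m : Int) = 5 →
      (∀ r ∈ PySem.List.pyRange 0 (n : Int) 1, (pvCell col world r).isSome = true) →
      (∀ i ∈ PySem.List.pyRange 0 (n : Int) 1, ∀ j ∈ PySem.List.pyRange 0 i 1,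
        ¬(pvCell col world i = pvCell col world j ∧ pvCell col world i ≠ some 0)) →
      ∀ (colVals : List Int),
        (∀ v : Int, v ∈ colVals ↔
          (v ≠ 0 ∧ ∃ r ∈ PySem.List.pyRange 0 (n : Int) 1, pvCell col world r = some v)) →
        colDifGo col world (PySem.List.pyRange (n : Int) 5 1) colVals =
          !(colDifAnyGo col world ((PySem.List.pyRange (n : Int) 5 1).flatMap
              (fun row => (PySem.List.pyRange 0 row 1).map (fun prev => (row, prev))))) := by
  intro m
  induction m with
  | zero =>
    intro n hn _ _ colVals _
    rw [PySem.List.pyRange_one_eq_nil (by omega)]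
    rfl
  | succ m ih =>
    intro n hn hread hnodup colVals hinv
    have hlt : (n : Int) < 5 := by push_cast at hn ⊢; omega
    -- row n is readable: Pre_ gives readability or an earlier nonzero duplicate, and the
    -- invariant rules the duplicate out
    have hcn : (pvCell col world (n : Int)).isSome = true := by
      rcases hpre (n : Int) (PySem.List.mem_pyRange_one.2 ⟨by positivity, hlt⟩) with h | h
      · exact h
      · obtain ⟨i, hi, j, hj, _, heq, hne⟩ := h
        exact absurd ⟨heq, hne⟩ (hnodup i hi j hj)
    obtain ⟨v, hv⟩ := Option.isSome_iff_exists.1 hcn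
    rw [PySem.List.pyRange_one_cons hlt, List.flatMap_cons]
    have hprevRead : ∀ p ∈ PySem.List.pyRange 0 (n : Int) 1,
        (pvCell col world p).isSome = true := hread
    rw [rowScan col world (n : Int) v hv _ _ hprevRead]
    have hany : (PySem.List.pyRange 0 (n : Int) 1).any
        (fun p => decide (v ≠ 0) && (pvCell col world p == some v)) =
        decide (v ∈ colVals) := by
      by_cases hm : v ∈ colVals
      · obtain ⟨hv0, r, hr, hcr⟩ := (hinv v).1 hm
        simp only [hm, decide_true, List.any_eq_true]
        exact ⟨r, hr, by simp [hv0, hcr]⟩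
      · simp only [hm, decide_false, List.any_eq_false]
        intro p hp hcond
        simp only [Bool.and_eq_true, decide_eq_true_eq, beq_iff_eq] at hcond
        exact hm ((hinv v).2 ⟨hcond.1, p, hp, hcond.2⟩)
    simp only [colDifGo, hv]
    by_cases hm : v ∈ colVals
    · rw [if_pos hm, hany]
      simp [hm]
    · rw [if_neg hm, hany]
      simp only [hm, decide_false, Bool.false_or]
      have hcast : (n : Int) + 1 = ((n + 1 : Nat) : Int) := by push_cast; ring
      rw [hcast]
      apply ih (n + 1) (by push_cast at hn ⊢; omega)
      · -- readability up to n+1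
        intro r hr
        rw [← hcast, PySem.List.pyRange_one_succ_right (by positivity)] at hr
        rcases List.mem_append.1 hr with hr | hr
        · exact hread r hr
        · rw [List.mem_singleton] at hr; subst hr; exact hcn
      · -- no nonzero duplicate among rows 0..n
        intro i hi j hj hdup
        rw [← hcast, PySem.List.pyRange_one_succ_right (by positivity)] at hi
        rcases List.mem_append.1 hi with hi | hi
        · exact hnodup i hi j hj hdup
        · rw [List.mem_singleton] at hi; subst hi
          obtain ⟨heq, hne⟩ := hdup
          rw [hv] at heq hne
          have hv0 : v ≠ 0 := fun h => hne (by rw [h])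
          exact hm ((hinv v).2 ⟨hv0, j, hj, heq.symm⟩)
      · -- the updated accumulator's invariant
        intro w
        rw [← hcast, PySem.List.pyRange_one_succ_right (by positivity)]
        by_cases hv0 : v = 0
        · rw [if_neg (by simp [hv0])]
          constructor
          · intro hw
            obtain ⟨hw0, r, hr, hcr⟩ := (hinv w).1 hw
            exact ⟨hw0, r, by simp [hr], hcr⟩
          · rintro ⟨hw0, r, hr, hcr⟩
            rcases List.mem_append.1 hr with hr | hr
            · exact (hinv w).2 ⟨hw0, r, hr, hcr⟩
            · rw [List.mem_singleton] at hr; subst hr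
              rw [hv] at hcr
              exact absurd (Option.some.inj hcr) (by subst hv0; exact fun h => hw0 h.symm)
        · rw [if_pos hv0]
          constructor
          · intro hw
            rcases List.mem_append.1 hw with hw | hw
            · obtain ⟨hw0, r, hr, hcr⟩ := (hinv w).1 hw
              exact ⟨hw0, r, by simp [hr], hcr⟩
            · rw [List.mem_singleton] at hw; subst hw
              exact ⟨hv0, (n : Int), by simp, hv⟩
          · rintro ⟨hw0, r, hr, hcr⟩
            rcases List.mem_append.1 hr with hr | hr
            · exact List.mem_append.2 (Or.inl ((hinv w).2 ⟨hw0, r, hr, hcr⟩))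
            · rw [List.mem_singleton] at hr; subst hr
              rw [hv] at hcr
              exact List.mem_append.2 (Or.inr (by simp [Option.some.inj hcr]))

-- ===== VERDICT (by name: the statement is the Claim_ definition above) =====
theorem colDif_spec : Claim_equal_colDif := by
  intro col world _ hpre
  unfold Spec_colDif colDif colDif_alt pvPairs
  have h := go_agree col world hpre 5 0 (by norm_num)
    (by rw [show ((0 : Nat) : Int) = 0 from rfl, PySem.List.pyRange_one_eq_nil (by norm_num)]; simp)
    (by rw [show ((0 : Nat) : Int) = 0 from rfl, PySem.List.pyRange_one_eq_nil (by norm_num)]; simp)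
    []
    (by
      intro v
      rw [show ((0 : Nat) : Int) = 0 from rfl, PySem.List.pyRange_one_eq_nil (by norm_num)]
      simp)
  simpa using h
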